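-- pv_equiv track=rewrite | github.com/altermetax/AutoWordle | autowordle/wordle_util.py | wordle_groups
-- ===== SOURCE A (Python) =====
-- def wordle_compare(guess, correct_word):
--     result = ["gray", "gray", "gray", "gray", "gray"]
--
--     # First check the greens
--     for i in range(len(correct_word)):
--         if correct_word[i] == guess[i]:
--             result[i] = "green"
--
--     # Then check the yellows
--     for i in range(len(correct_word)):
--         if result[i] != "green": # If this position was not guessed with a green
--             for j in range(len(guess)):
--                 if correct_word[i] == guess[j] and result[j] == "gray":
--                     result[j] = "yellow"
--                     break
--
--     return tuple(result)
--
-- def wordle_groups(guess, current_dictionary):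
--     # Group all remaining words based on what the outcome would be if they were the correct word
--     # and pick the largest group
--     groups = {}
--
--     for word in current_dictionary:
--         result = wordle_compare(guess, word)
--         if result in groups:
--             groups[result].append(word)
--         else:
--             groups[result] = [word]
--
--     return groups
-- ===== SOURCE B (Python) =====
-- def wordle_compare(guess, correct_word):
--     # Greens as a boolean mask over the correct word's positions
--     greens = [i < len(guess) and correct_word[i] == guess[i]
--               for i in range(len(correct_word))]
--     # Multiset of the correct word's non-green letters
--     counts = {}
--     for flag, c in zip(greens, correct_word):
--         if not flag:
--             counts[c] = counts.get(c, 0) + 1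
--     # Build the 5-slot result front to back, consuming counts for yellows
--     result = []
--     for j in range(5):
--         if j < len(greens) and greens[j]:
--             result.append("green")
--         elif j < len(guess) and counts.get(guess[j], 0) > 0:
--             result.append("yellow")
--             counts[guess[j]] -= 1
--         else:
--             result.append("gray")
--     return tuple(result)
--
--
-- def wordle_groups(guess, current_dictionary):
--     groups = {}
--     for word in current_dictionary:
--         groups.setdefault(wordle_compare(guess, word), []).append(word)
--     return groups
-- ===== Notes on version B (the rewrite author's own statement) =====
-- stated objective: faster
-- what changed: B replaces A's mutate-in-place string list and nested yellow scan by a three-stage functional pipeline: a boolean green mask, a dict multiset of the non-green letters of the correct word, and a front-to-back construction of the 5-slot result that consumes counts for yellows; the grouping loop uses dict.setdefault instead of an explicit membership test.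
import Mathlib
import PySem

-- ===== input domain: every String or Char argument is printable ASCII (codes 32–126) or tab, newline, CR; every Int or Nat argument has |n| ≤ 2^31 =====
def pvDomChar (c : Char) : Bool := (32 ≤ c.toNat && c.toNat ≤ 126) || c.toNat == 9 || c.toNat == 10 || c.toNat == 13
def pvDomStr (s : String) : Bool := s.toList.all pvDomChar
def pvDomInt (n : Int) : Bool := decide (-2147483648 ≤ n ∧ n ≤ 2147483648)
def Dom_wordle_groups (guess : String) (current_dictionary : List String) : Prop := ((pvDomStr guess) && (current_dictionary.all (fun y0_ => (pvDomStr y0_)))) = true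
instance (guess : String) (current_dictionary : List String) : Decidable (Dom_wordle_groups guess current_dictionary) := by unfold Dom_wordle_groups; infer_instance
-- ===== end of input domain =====

-- B replaces A's in-place marking with nested yellow scans by a three-stage pipeline: a boolean
-- green mask, a dict multiset of non-green letters, and a front-to-back build of the 5-slot result.

-- ===== PORT A =====
-- A's green pass over the shared 5-slot result list
-- ('for i in range(len(correct_word)): if correct_word[i] == guess[i]: result[i] = "green"')
def pvGreen : List String → List Char → List Char → List String
  | [], _, _ => []
  | s :: r', [], _ => s :: r'
  | s :: r', _ :: _, [] => s :: r'
  | s :: r', c :: cs, g :: gss => (if c == g then "green" else s) :: pvGreen r' cs gss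

-- A's inner loop: 'for j in range(len(guess)): if correct_word[i] == guess[j] and result[j] == "gray": result[j] = "yellow"; break'
def pvMarkFirst : List String → List Char → Char → List String
  | [], _, _ => []
  | s :: r', [], _ => s :: r'
  | s :: r', g :: gss, c => if c == g && s == "gray" then "yellow" :: r' else s :: pvMarkFirst r' gss c

def pvCompareA (gs cw : List Char) : List String :=
  let r1 := pvGreen ["gray", "gray", "gray", "gray", "gray"] cw gs
  -- 'for i in range(len(correct_word)): if result[i] != "green": <inner scan>'
  (PySem.List.enumerate cw 0).foldl
    (fun r ic => if PySem.List.pyGetD r ic.1 "" ≠ "green" then pvMarkFirst r gs ic.2 else r) r1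

def wordle_groups (guess : String) (current_dictionary : List String) : List (List String × List String) :=
  (current_dictionary.foldl
    (fun d w =>
      let res := pvCompareA guess.toList w.toList
      match d.get? res with
      | some l => d.insert res (l ++ [w])
      | none => d.insert res [w])
    (PySem.Dict.empty : PySem.Dict (List String) (List String))).items

-- ===== PORT B =====
-- 'greens = [i < len(guess) and correct_word[i] == guess[i] for i in range(len(correct_word))]'
def pvGreens : List Char → List Char → List Bool
  | [], _ => []
  | _ :: cs, [] => false :: pvGreens cs []
  | c :: cs, g :: gss => (c == g) :: pvGreens cs gss

-- 'for flag, c in zip(greens, correct_word): if not flag: counts[c] = counts.get(c, 0) + 1'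
def pvCountsB (ps : List (Bool × Char)) : PySem.Dict Char Int :=
  ps.foldl (fun m p => if !p.1 then m.insert p.2 (m.getD p.2 0 + 1) else m) PySem.Dict.empty

-- 'for j in range(5): green if greens[j] else yellow-if-count else gray' (greens and guess consumed in lockstep)
def pvBuild : Nat → List Bool → List Char → PySem.Dict Char Int → List String
  | 0, _, _, _ => []
  | k+1, f :: fs, g :: gss, m =>
      if f then "green" :: pvBuild k fs gss m
      else if m.getD g 0 > 0 then "yellow" :: pvBuild k fs gss (m.insert g (m.getD g 0 - 1))
      else "gray" :: pvBuild k fs gss m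
  | k+1, f :: fs, [], m => (if f then "green" else "gray") :: pvBuild k fs [] m
  | k+1, [], g :: gss, m =>
      if m.getD g 0 > 0 then "yellow" :: pvBuild k [] gss (m.insert g (m.getD g 0 - 1))
      else "gray" :: pvBuild k [] gss m
  | k+1, [], [], m => "gray" :: pvBuild k [] [] m

def pvCompareB (gs cw : List Char) : List String :=
  let fs := pvGreens cw gs
  pvBuild 5 fs gs (pvCountsB (fs.zip cw))

-- 'for word in current_dictionary: groups.setdefault(wordle_compare(guess, word), []).append(word)'
def pvGroupLoop (gs : List Char) : List String → PySem.Dict (List String) (List String) → PySem.Dict (List String) (List String)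
  | [], d => d
  | w :: ws, d =>
      let res := pvCompareB gs w.toList
      pvGroupLoop gs ws (d.insert res (d.getD res [] ++ [w]))

def wordle_groups_alt (guess : String) (current_dictionary : List String) : List (List String × List String) :=
  (pvGroupLoop guess.toList current_dictionary PySem.Dict.empty).items

-- ===== PRECONDITION & SPEC =====
-- Pre_ excludes inputs on which A raises IndexError (a word longer than the guess or than the 5-slot
-- result list, or a guess longer than 5 one of whose tail letters equals a non-positionally-matched
-- word letter, making a scan read result[j] at j ≥ 5); outside these A's returning at all depends on
-- incidental break positions of its inner scan.
def Pre_wordle_groups (guess : String) (current_dictionary : List String) : Prop :=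
  ∀ w ∈ current_dictionary,
    w.toList.length ≤ guess.toList.length ∧ w.toList.length ≤ 5 ∧
      (guess.toList.length ≤ 5 ∨
        ∀ p ∈ w.toList.zip guess.toList, p.1 = p.2 ∨ p.1 ∉ guess.toList.drop 5)
instance (guess : String) (current_dictionary : List String) : Decidable (Pre_wordle_groups guess current_dictionary) := by unfold Pre_wordle_groups; infer_instance

def pvWitness_wordle_groups : String × List String := ("crane", ["slate", "cocoa", "ab", ""])

def Spec_wordle_groups (guess : String) (current_dictionary : List String) (out : List (List String × List String)) : Prop := out = wordle_groups_alt guess current_dictionary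
instance (guess : String) (current_dictionary : List String) (out : List (List String × List String)) : Decidable (Spec_wordle_groups guess current_dictionary out) := by unfold Spec_wordle_groups; infer_instance

-- ===== CLAIM (what is proved, stated in full; the proofs are below) =====
def Claim_equal_wordle_groups : Prop := ∀ (guess : String) (current_dictionary : List String), Dom_wordle_groups guess current_dictionary → Pre_wordle_groups guess current_dictionary → Spec_wordle_groups guess current_dictionary (wordle_groups guess current_dictionary)

-- ===== LEMMAS AND PROOFS =====

def pvColor (b : Bool) : String := if b then "green" else "gray"

-- proof-side sweep: A's yellow phase as a count-consuming left-to-right pass over the guess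
def pvSweepG : List String → List Char → PySem.Dict Char Int → List String
  | [], _, _ => []
  | s :: r', [], _ => s :: r'
  | s :: r', g :: gss, m =>
      if m.getD g 0 > 0 && s == "gray" then "yellow" :: pvSweepG r' gss (m.insert g (m.getD g 0 - 1))
      else s :: pvSweepG r' gss m

theorem pvSweepG_nil_gs : ∀ (r : List String) (m : PySem.Dict Char Int), pvSweepG r [] m = r := by
  intro r m; cases r <;> rw [pvSweepG]

theorem pvSweepG_ext : ∀ (r : List String) (gs : List Char) (m m' : PySem.Dict Char Int),
    (∀ d, m.getD d 0 = m'.getD d 0) → pvSweepG r gs m = pvSweepG r gs m' := by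
  intro r
  induction r with
  | nil => intro gs m m' _; rw [pvSweepG, pvSweepG]
  | cons s r' ih =>
    intro gs m m' h
    cases gs with
    | nil => rw [pvSweepG, pvSweepG]
    | cons g gss =>
      rw [pvSweepG, pvSweepG, h g]
      split
      · refine congrArg _ (ih gss _ _ ?_)
        intro d
        rw [PySem.Dict.getD_insert, PySem.Dict.getD_insert]
        split
        · rfl
        · exact h d
      · exact congrArg _ (ih gss _ _ h)

theorem pvSweepG_zero : ∀ (r : List String) (gs : List Char) (m : PySem.Dict Char Int),
    (∀ d, m.getD d 0 ≤ 0) → pvSweepG r gs m = r := by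
  intro r
  induction r with
  | nil => intro gs m _; rw [pvSweepG]
  | cons s r' ih =>
    intro gs m h
    cases gs with
    | nil => rw [pvSweepG]
    | cons g gss =>
      rw [pvSweepG]
      rw [if_neg (by have := h g; simp; omega)]
      exact congrArg _ (ih gss m h)

-- core lemma: sweeping with one extra count of c equals marking the leftmost gray c first, then sweeping
theorem pvSweepG_markFirst : ∀ (r : List String) (gs : List Char) (c : Char) (m m' : PySem.Dict Char Int),
    (∀ d, 0 ≤ m.getD d 0) →
    (∀ d, m'.getD d 0 = m.getD d 0 + (if d = c then 1 else 0)) →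
    pvSweepG r gs m' = pvSweepG (pvMarkFirst r gs c) gs m := by
  intro r
  induction r with
  | nil => intro gs c m m' _ _; rw [pvMarkFirst, pvSweepG, pvSweepG]
  | cons s r' ih =>
    intro gs c m m' hnn hm
    cases gs with
    | nil => rw [pvMarkFirst, pvSweepG, pvSweepG]
    | cons g gss =>
      rw [pvMarkFirst]
      by_cases hcg : c = g
      · by_cases hsg : s = "gray"
        · rw [if_pos (by simp [hcg, hsg])]
          subst hsg
          rw [pvSweepG, pvSweepG]
          have hpos : m'.getD g 0 > 0 := by
            have h1 := hm g; rw [hcg] at h1; rw [if_pos rfl] at h1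
            have h2 := hnn g; omega
          rw [if_pos (by simp [hpos]), if_neg (by simp)]
          refine congrArg _ (pvSweepG_ext r' gss _ m ?_)
          intro d
          rw [PySem.Dict.getD_insert]
          by_cases hd : d = g
          · rw [if_pos hd]
            have h1 := hm g; rw [hcg, if_pos rfl] at h1
            rw [hd]; omega
          · rw [if_neg hd]
            have h1 := hm d; rw [hcg, if_neg hd] at h1; omega
        · rw [if_neg (by simp [hsg])]
          rw [pvSweepG, pvSweepG]
          rw [if_neg (by simp [hsg]), if_neg (by simp [hsg])]
          exact congrArg _ (ih gss c m m' hnn hm)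
      · rw [if_neg (by simp [hcg])]
        rw [pvSweepG, pvSweepG]
        have hg : m'.getD g 0 = m.getD g 0 := by
          have h1 := hm g; rw [if_neg (fun h => hcg h.symm)] at h1; omega
        rw [hg]
        split
        · rename_i hcond
          refine congrArg _ (ih gss c (m.insert g (m.getD g 0 - 1)) (m'.insert g (m.getD g 0 - 1)) ?_ ?_)
          · intro d
            rw [PySem.Dict.getD_insert]
            by_cases hd : d = g
            · rw [if_pos hd]; simp at hcond; omega
            · rw [if_neg hd]; exact hnn d
          · intro d
            rw [PySem.Dict.getD_insert, PySem.Dict.getD_insert]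
            by_cases hd : d = g
            · rw [if_pos hd, if_pos hd, if_neg (by rw [hd]; exact fun hh => hcg hh.symm)]; ring
            · rw [if_neg hd, if_neg hd]; exact hm d
        · exact congrArg _ (ih gss c m m' hnn hm)

-- A's letter-by-letter marking equals a count-consuming sweep
theorem pvFold_markFirst_eq_sweepG : ∀ (L : List Char) (r : List String) (gs : List Char) (m' : PySem.Dict Char Int),
    (∀ d, m'.getD d 0 = (L.count d : Int)) →
    L.foldl (fun r c => pvMarkFirst r gs c) r = pvSweepG r gs m' := by
  intro L
  induction L with
  | nil =>
    intro r gs m' hm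
    rw [List.foldl_nil, pvSweepG_zero r gs m' (fun d => by rw [hm d]; simp)]
  | cons c L ih =>
    intro r gs m' hm
    rw [List.foldl_cons]
    rw [ih (pvMarkFirst r gs c) gs (PySem.Dict.counter L)
          (fun d => PySem.Dict.getD_counter L d)]
    refine (pvSweepG_markFirst r gs c (PySem.Dict.counter L) m' ?_ ?_).symm
    · intro d; rw [PySem.Dict.getD_counter]; exact Int.natCast_nonneg _
    · intro d
      rw [hm d, PySem.Dict.getD_counter, List.count_cons]
      by_cases hd : d = c
      · simp [hd]
      · simp [hd, Ne.symm hd]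

-- pvMarkFirst never creates or destroys a "green" at any index
theorem pvMarkFirst_getD_green : ∀ (r : List String) (gs : List Char) (c : Char) (k : Nat),
    ((pvMarkFirst r gs c).getD k "" = "green") ↔ (r.getD k "" = "green") := by
  intro r
  induction r with
  | nil => intro gs c k; rw [pvMarkFirst]
  | cons s r' ih =>
    intro gs c k
    cases gs with
    | nil => rw [pvMarkFirst]
    | cons g gss =>
      rw [pvMarkFirst]
      split
      · rename_i h
        have hs : s = "gray" := by
          have := (Bool.and_eq_true _ _).mp h
          simpa using this.2
        cases k with
        | zero => subst hs; simp [List.getD]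
        | succ k => simp [List.getD]
      · cases k with
        | zero => simp [List.getD]
        | succ k => simpa [List.getD] using ih gss c k

theorem pvPyGetD_nonneg (xs : List String) (i : Int) (h : 0 ≤ i) :
    PySem.List.pyGetD xs i "" = xs.getD i.toNat "" := by
  show (PySem.List.pyGet? xs i).getD "" = _
  rw [PySem.List.pyGet?_of_nonneg xs h, List.getD_eq_getElem?_getD]

-- A's outer loop reads result[i], but markFirst preserves green-ness, so the test may read the
-- post-green array r1 instead
theorem pvYellow_fix : ∀ (ecs : List (Int × Char)) (r r1 : List String) (gs : List Char),
    (∀ p ∈ ecs, 0 ≤ p.1) →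
    (∀ k : Nat, (r.getD k "" = "green") ↔ (r1.getD k "" = "green")) →
    ecs.foldl (fun r ic => if PySem.List.pyGetD r ic.1 "" ≠ "green" then pvMarkFirst r gs ic.2 else r) r
      = ecs.foldl (fun r ic => if PySem.List.pyGetD r1 ic.1 "" ≠ "green" then pvMarkFirst r gs ic.2 else r) r := by
  intro ecs
  induction ecs with
  | nil => intro r r1 gs _ _; rfl
  | cons p ecs ih =>
    intro r r1 gs hpos hgr
    have hp : 0 ≤ p.1 := hpos p List.mem_cons_self
    have hcond : (PySem.List.pyGetD r p.1 "" = "green") ↔ (PySem.List.pyGetD r1 p.1 "" = "green") := by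
      rw [pvPyGetD_nonneg r p.1 hp, pvPyGetD_nonneg r1 p.1 hp]
      exact hgr p.1.toNat
    rw [List.foldl_cons, List.foldl_cons]
    by_cases hc : PySem.List.pyGetD r1 p.1 "" ≠ "green"
    · rw [if_pos (fun hh => hc (hcond.mp hh)), if_pos hc]
      exact ih _ r1 gs (fun q hq => hpos q (List.mem_cons_of_mem _ hq))
        (fun k => (pvMarkFirst_getD_green r gs p.2 k).trans (hgr k))
    · have hr1 : PySem.List.pyGetD r1 p.1 "" = "green" := not_not.mp hc
      rw [if_neg (fun hh => hh (hcond.mpr hr1)), if_neg hc]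
      exact ih r r1 gs (fun q hq => hpos q (List.mem_cons_of_mem _ hq)) hgr

theorem pvGreen_nil_cw : ∀ (r : List String) (gs : List Char), pvGreen r [] gs = r := by
  intro r gs; cases r <;> rw [pvGreen]

theorem pvGreens_length : ∀ (cw gs : List Char), (pvGreens cw gs).length = cw.length := by
  intro cw
  induction cw with
  | nil => intro gs; simp [pvGreens]
  | cons c cs ih =>
    intro gs
    cases gs with
    | nil => rw [pvGreens]; simp [ih]
    | cons g gss => rw [pvGreens]; simp [ih]

theorem pvGreens_nil : ∀ (cw : List Char), pvGreens cw [] = List.replicate cw.length false := by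
  intro cw
  induction cw with
  | nil => rw [pvGreens]; rfl
  | cons c cs ih => rw [pvGreens, ih]; rfl

-- A's green pass on the 5 gray slots is B's boolean mask, colored, plus gray padding
theorem pvGreen_eq_mask : ∀ (cw gs : List Char) (k : Nat), cw.length ≤ k →
    pvGreen (List.replicate k "gray") cw gs
      = (pvGreens cw gs).map pvColor ++ List.replicate (k - cw.length) "gray" := by
  intro cw
  induction cw with
  | nil =>
    intro gs k _
    rw [pvGreen_nil_cw, pvGreens]
    simp
  | cons c cs ih =>
    intro gs k hk
    cases k with
    | zero => exact absurd hk (by simp)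
    | succ k =>
      rw [List.replicate_succ]
      cases gs with
      | nil =>
        rw [pvGreen, pvGreens, pvGreens_nil]
        simp only [List.map_cons, List.map_replicate, List.length_cons, Nat.succ_sub_succ,
          List.cons_append]
        have h1 : pvColor false = "gray" := by simp [pvColor]
        have h2 : cs.length + (k - cs.length) = k := by simp at hk; omega
        rw [h1, List.replicate_append_replicate, h2]
      | cons g gss =>
        rw [pvGreen, pvGreens, ih gss k (by simpa using hk)]
        simp [pvColor]

-- B's front-to-back build is the count-consuming sweep over mask-colored slots
theorem pvBuild_eq_sweepG : ∀ (k : Nat) (fs : List Bool) (gs : List Char) (m : PySem.Dict Char Int),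
    fs.length ≤ k →
    pvBuild k fs gs m = pvSweepG ((fs.map pvColor) ++ List.replicate (k - fs.length) "gray") gs m := by
  intro k
  induction k with
  | zero =>
    intro fs gs m h
    have : fs = [] := List.length_eq_zero_iff.mp (Nat.le_zero.mp h)
    subst this
    rw [pvBuild]; rfl
  | succ k ih =>
    intro fs gs m h
    cases fs with
    | nil =>
      simp only [List.map_nil, List.nil_append, Nat.sub_zero, List.length_nil]
      rw [List.replicate_succ]
      cases gs with
      | nil =>
        rw [pvBuild, pvSweepG, ih [] [] m (Nat.zero_le _), pvSweepG_nil_gs]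
        simp
      | cons g gss =>
        rw [pvBuild, pvSweepG]
        have h0 := ih [] gss
        simp only [List.map_nil, List.nil_append, List.length_nil, Nat.sub_zero] at h0
        by_cases hg : m.getD g 0 > 0
        · rw [if_pos hg, if_pos (by simp [hg]), h0 _ (Nat.zero_le _)]
        · rw [if_neg hg, if_neg (by simp [hg]), h0 _ (Nat.zero_le _)]
    | cons f fs' =>
      have hlen : fs'.length ≤ k := by simpa using h
      simp only [List.length_cons, Nat.succ_sub_succ, List.map_cons, List.cons_append]
      cases gs with
      | nil =>
        rw [pvBuild, pvSweepG, ih fs' [] m hlen, pvSweepG_nil_gs]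
        by_cases hf : f = true <;> simp [pvColor, hf]
      | cons g gss =>
        rw [pvBuild, pvSweepG]
        by_cases hf : f = true
        · rw [if_pos hf, if_neg (by simp [pvColor, hf]), ih fs' gss m hlen]
          simp [pvColor, hf]
        · simp only [Bool.not_eq_true] at hf
          rw [if_neg (by simp [hf])]
          by_cases hg : m.getD g 0 > 0
          · rw [if_pos hg, if_pos (by simp [pvColor, hf, hg]),
                ih fs' gss (m.insert g (m.getD g 0 - 1)) hlen]
          · rw [if_neg hg, if_neg (by simp [pvColor, hf, hg]), ih fs' gss m hlen]
            simp [pvColor, hf]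

-- the zip-filtered non-green letters are exactly A's enumerate-filtered ones
theorem pvZipFilter : ∀ (cw : List Char) (fs : List Bool) (s : Int) (r1 : List String),
    fs.length = cw.length →
    (∀ j : Nat, j < cw.length → PySem.List.pyGetD r1 (s + j) "" = pvColor (fs.getD j false)) →
    ((fs.zip cw).filter (fun p => !p.1)).map Prod.snd
      = ((PySem.List.enumerate cw s).filter
          (fun ic => decide (PySem.List.pyGetD r1 ic.1 "" ≠ "green"))).map Prod.snd := by
  intro cw
  induction cw with
  | nil =>
    intro fs s r1 hlen _
    have : fs = [] := List.length_eq_zero_iff.mp hlen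
    subst this
    rw [PySem.List.enumerate_nil]; rfl
  | cons c cs ih =>
    intro fs s r1 hlen hget
    cases fs with
    | nil => exact absurd hlen (by simp)
    | cons f fs' =>
      rw [PySem.List.enumerate_cons, List.zip_cons_cons, List.filter_cons, List.filter_cons]
      have h0 := hget 0 (by simp)
      simp only [Nat.cast_zero, add_zero, List.getD_cons_zero] at h0
      have hcond : (decide (PySem.List.pyGetD r1 s "" ≠ "green")) = !f := by
        rw [h0]
        by_cases hf : f = true <;> simp [pvColor, hf]
      have htail := ih fs' (s + 1) r1 (by simpa using hlen) (by
        intro j hj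
        have := hget (j + 1) (by simpa using hj)
        simpa [add_assoc, add_comm, add_left_comm] using this)
      rw [hcond]
      by_cases hf : f = true
      · simp only [hf, Bool.not_true, if_neg (by simp : ¬ (false = true))]
        exact htail
      · simp only [Bool.not_eq_true] at hf
        simp only [hf, Bool.not_false]
        exact congrArg _ htail

-- B's counter dict counts occurrences in the zip-filtered letters
theorem pvCountsB_getD (ps : List (Bool × Char)) (d : Char) :
    (pvCountsB ps).getD d 0 = (((ps.filter (fun p => !p.1)).map Prod.snd).count d : Int) := by
  unfold pvCountsB
  rw [PySem.List.foldl_if_eq_foldl_filter]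
  rw [← List.foldl_map (f := Prod.snd)
        (g := fun (m : PySem.Dict Char Int) (c : Char) => m.insert c (m.getD c 0 + 1))]
  rw [PySem.Dict.getD_foldl_insert_add_one, PySem.Dict.getD_empty]
  simp

-- per-word equality of the two compare functions (word no longer than 5 letters)
theorem wordle_compare_eq (gs cw : List Char) (h5 : cw.length ≤ 5) :
    pvCompareA gs cw = pvCompareB gs cw := by
  have hrep : (["gray", "gray", "gray", "gray", "gray"] : List String) = List.replicate 5 "gray" := rfl
  simp only [pvCompareA, pvCompareB, hrep]
  set fs := pvGreens cw gs with hfs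
  have hmask := pvGreen_eq_mask cw gs 5 h5
  rw [← hfs] at hmask
  set r1 := pvGreen (List.replicate 5 "gray") cw gs with hr1
  have hlenfs : fs.length = cw.length := pvGreens_length cw gs
  have hget : ∀ j : Nat, j < cw.length → PySem.List.pyGetD r1 ((0 : Int) + j) "" = pvColor (fs.getD j false) := by
    intro j hj
    have hjf : j < fs.length := by omega
    rw [zero_add, PySem.List.pyGetD_natCast, hmask]
    rw [List.getD_eq_getElem?_getD, List.getElem?_append_left (by simpa using hjf),
        List.getElem?_map, List.getD_eq_getElem?_getD]
    simp [List.getElem?_eq_getElem hjf]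
  have hpos : ∀ p ∈ PySem.List.enumerate cw 0, 0 ≤ p.1 := by
    intro p hp
    rcases (PySem.List.mem_enumerate_iff cw 0 p).mp hp with ⟨k, hk, rfl⟩
    simp
  rw [pvYellow_fix _ _ r1 gs hpos (fun k => Iff.rfl)]
  rw [PySem.List.foldl_ite_eq_foldl_filter]
  set E := List.filter (fun ic => decide (PySem.List.pyGetD r1 ic.1 "" ≠ "green"))
      (PySem.List.enumerate cw 0) with hE
  rw [← List.foldl_map (f := fun ic : Int × Char => ic.2) (g := fun r c => pvMarkFirst r gs c)]
  rw [pvFold_markFirst_eq_sweepG (E.map (fun ic => ic.2)) r1 gs (pvCountsB (fs.zip cw)) (by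
    intro d
    rw [pvCountsB_getD, pvZipFilter cw fs 0 r1 hlenfs hget, hE])]
  rw [pvBuild_eq_sweepG 5 fs gs _ (by rw [hlenfs]; omega), hlenfs, ← hmask]

-- B's recursive grouping loop as A's fold
theorem pvGroupLoop_eq_foldl (gs : List Char) : ∀ (ws : List String) (d : PySem.Dict (List String) (List String)),
    pvGroupLoop gs ws d
      = ws.foldl (fun d w =>
          let res := pvCompareB gs w.toList
          d.insert res (d.getD res [] ++ [w])) d := by
  intro ws
  induction ws with
  | nil => intro d; rw [pvGroupLoop, List.foldl_nil]
  | cons w ws ih => intro d; rw [pvGroupLoop, List.foldl_cons, ih]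

-- ===== VERDICT (by name: the statement is the Claim_ definition above) =====
theorem wordle_groups_spec : Claim_equal_wordle_groups := by
  intro guess cd _ hpre
  unfold Spec_wordle_groups wordle_groups wordle_groups_alt
  rw [pvGroupLoop_eq_foldl]
  refine congrArg PySem.Dict.items (PySem.List.foldl_congr_mem _ _ _ _ ?_)
  intro d w hw
  dsimp only
  rw [wordle_compare_eq guess.toList w.toList (hpre w hw).2.1]
  cases h : d.get? (pvCompareB guess.toList w.toList) with
  | some l => simp [h, PySem.Dict.getD_eq_get?_getD]
  | none => simp [h, PySem.Dict.getD_eq_get?_getD]
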